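-- pv_equiv track=rewrite | github.com/DA-testa/convert-array-into-heap-ArtursVanags221RDB172 | build_heap.py | build_heap
-- ===== SOURCE A (Python) =====
-- def build_heap(data):
--     swaps = []
--     # try to achieve  O(n) and not O(n2)
--     n = len(data)
--     for i in range(n// 2, -1, -1):
--
--         smth=i
--         right = 2*smth+2
--         left = 2*smth+1
--
--         while True:
--             index = smth
--             if right < n and data[right] < data[index]:
--                 index = right
--             if left < n and data[left] < data[index]:
--                 index=left
--
--             if smth != index:
--                 swaps.append((smth, index))
--                 data[smth], data[index] = data[index], data[smth]
--                 smth = index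
--                 right= 2*smth + 2
--                 left= 2*smth + 1
--
--             else:
--                 break
--
--
--     return swaps
-- ===== SOURCE B (Python) =====
-- def build_heap(data):
--     n = len(data)
--     swaps = []
--
--     def sift_down(i):
--         left = 2 * i + 1
--         right = 2 * i + 2
--         index = i
--         if right < n and data[right] < data[index]:
--             index = right
--         if left < n and data[left] < data[index]:
--             index = left
--         if index != i:
--             swaps.append((i, index))
--             data[i], data[index] = data[index], data[i]
--             sift_down(index)
--
--     for i in reversed(range(n // 2 + 1)):
--         sift_down(i)
--     return swaps
-- ===== Notes on version B (the rewrite author's own statement) =====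
-- stated objective: alternative
-- what changed: The explicit while-True descent with hand-maintained smth/left/right loop state is replaced by a recursive sift_down helper over the heap tree, driven by a reversed-range for loop.
import Mathlib
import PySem

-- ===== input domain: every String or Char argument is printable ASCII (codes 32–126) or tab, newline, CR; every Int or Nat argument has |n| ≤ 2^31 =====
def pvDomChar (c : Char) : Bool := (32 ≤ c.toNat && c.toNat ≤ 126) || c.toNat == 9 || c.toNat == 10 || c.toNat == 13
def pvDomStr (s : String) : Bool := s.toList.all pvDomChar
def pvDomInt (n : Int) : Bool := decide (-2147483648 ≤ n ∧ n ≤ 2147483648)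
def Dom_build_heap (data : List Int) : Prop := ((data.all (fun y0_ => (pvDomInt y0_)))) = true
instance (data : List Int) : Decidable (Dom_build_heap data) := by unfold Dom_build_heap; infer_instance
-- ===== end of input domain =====

-- B rewrites the explicit while-True descent as a recursive sift_down helper over the heap tree
-- (alternative decomposition, same cost); both versions mutate `data` in place identically in
-- Python — the equivalence proved here is about the returned swap list.

-- ===== PORT A =====
-- the while-True loop; fuel is only a totality guard (the descent strictly increases smth < n)
def pvSiftLoopA (n : Int) : Nat → Int × Int × Int × List Int × List (Int × Int) → Int × Int × Int × List Int × List (Int × Int)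
  | 0, st => st
  | fuel+1, (smth, right, left, d, swaps) =>
    let index := smth
    let index := if right < n ∧ PySem.List.pyGetD d right 0 < PySem.List.pyGetD d index 0 then right else index
    let index := if left < n ∧ PySem.List.pyGetD d left 0 < PySem.List.pyGetD d index 0 then left else index
    if smth ≠ index then
      pvSiftLoopA n fuel (index, 2*index+2, 2*index+1,
        PySem.List.pySetD (PySem.List.pySetD d smth (PySem.List.pyGetD d index 0)) index (PySem.List.pyGetD d smth 0),
        swaps ++ [(smth, index)])
    else (smth, right, left, d, swaps)

def build_heap (data : List Int) : List (Int × Int) :=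
  let n : Int := data.length
  let res := (PySem.List.pyRange (PySem.Int.floordiv n 2) (-1) (-1)).foldl
    (fun st i =>
      let r := pvSiftLoopA n (data.length + 1) (i, 2*i+2, 2*i+1, st.1, st.2)
      (r.2.2.2.1, r.2.2.2.2))
    (data, ([] : List (Int × Int)))
  res.2

-- ===== PORT B =====
-- recursive sift_down (fuel is only a totality guard: the recursion index strictly increases)
def pvSiftDownB (d : List Int) (swaps : List (Int × Int)) : Nat → Nat → List Int × List (Int × Int)
  | 0, _ => (d, swaps)
  | fuel+1, i =>
    let n := d.length
    let left := 2*i+1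
    let right := 2*i+2
    let index := i
    let index := if right < n ∧ d.getD right 0 < d.getD index 0 then right else index
    let index := if left < n ∧ d.getD left 0 < d.getD index 0 then left else index
    if index ≠ i then
      pvSiftDownB ((d.set i (d.getD index 0)).set index (d.getD i 0)) (swaps ++ [((i : Int), (index : Int))]) fuel index
    else (d, swaps)

-- 'for i in reversed(range(n // 2 + 1))': k counts down to 0
def pvHeapifyB : Nat → List Int → List (Int × Int) → List Int × List (Int × Int)
  | 0, d, s => pvSiftDownB d s (d.length + 1) 0
  | k+1, d, s =>
    let r := pvSiftDownB d s (d.length + 1) (k+1)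
    pvHeapifyB k r.1 r.2

def build_heap_alt (data : List Int) : List (Int × Int) :=
  (pvHeapifyB (data.length / 2) data []).2

-- ===== PRECONDITION & SPEC =====
def Spec_build_heap (data : List Int) (out : List (Int × Int)) : Prop := out = build_heap_alt data
instance (data : List Int) (out : List (Int × Int)) : Decidable (Spec_build_heap data out) := by unfold Spec_build_heap; infer_instance

-- ===== CLAIM (what is proved, stated in full; the proofs are below) =====
def Claim_equal_build_heap : Prop := ∀ (data : List Int), Dom_build_heap data → Spec_build_heap data (build_heap data)

-- ===== LEMMAS AND PROOFS =====

lemma pvSiftDownB_length (f : Nat) : ∀ (i : Nat) (d : List Int) (s : List (Int × Int)),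
    (pvSiftDownB d s f i).1.length = d.length := by
  induction f with
  | zero => intro i d s; simp [pvSiftDownB]
  | succ f ih =>
    intro i d s
    simp only [pvSiftDownB]
    split_ifs <;> simp [ih]

lemma inner_eq (N : Nat) (f : Nat) : ∀ (i : Nat) (d : List Int) (s : List (Int × Int)),
    d.length = N →
    ((pvSiftLoopA (N : Int) f ((i : Int), 2*(i : Int)+2, 2*(i : Int)+1, d, s)).2.2.2.1,
     (pvSiftLoopA (N : Int) f ((i : Int), 2*(i : Int)+2, 2*(i : Int)+1, d, s)).2.2.2.2) =
    pvSiftDownB d s f i := by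
  induction f with
  | zero => intro i d s _; simp [pvSiftLoopA, pvSiftDownB]
  | succ f ih =>
    intro i d s hlen
    subst hlen
    simp only [pvSiftLoopA, pvSiftDownB]
    rw [show (2*(i : Int)+2) = ((2*i+2 : Nat) : Int) by push_cast; ring,
        show (2*(i : Int)+1) = ((2*i+1 : Nat) : Int) by push_cast; ring]
    simp only [PySem.List.pyGetD_natCast, PySem.List.pySetD_natCast, Nat.cast_lt, ne_eq]
    split_ifs with h1 h2 h3 h4 h5 h6 h7 h8 h9 h10 h11 h12 <;>
      (try simp only [PySem.List.pyGetD_natCast, PySem.List.pySetD_natCast] at *) <;>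
      first
        | rfl
        | (rw [show (2*((2*i+1 : Nat) : Int)+2) = ((2*(2*i+1)+2 : Nat) : Int) by push_cast; ring,
               show (2*((2*i+1 : Nat) : Int)+1) = ((2*(2*i+1)+1 : Nat) : Int) by push_cast; ring]
           exact ih (2*i+1) _ _ (by simp))
        | (rw [show (2*((2*i+2 : Nat) : Int)+2) = ((2*(2*i+2)+2 : Nat) : Int) by push_cast; ring,
               show (2*((2*i+2 : Nat) : Int)+1) = ((2*(2*i+2)+1 : Nat) : Int) by push_cast; ring]
           exact ih (2*i+2) _ _ (by simp))
        | (exfalso; omega)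
        | (exfalso; exact (by assumption : ¬True) trivial)

lemma outer_eq (N : Nat) : ∀ (k : Nat) (d : List Int) (s : List (Int × Int)),
    d.length = N →
    (PySem.List.pyRange (k : Int) (-1) (-1)).foldl
      (fun st i =>
        ((pvSiftLoopA (N : Int) (N + 1) (i, 2*i+2, 2*i+1, st.1, st.2)).2.2.2.1,
         (pvSiftLoopA (N : Int) (N + 1) (i, 2*i+2, 2*i+1, st.1, st.2)).2.2.2.2)) (d, s) =
    pvHeapifyB k d s := by
  intro k
  induction k with
  | zero =>
    intro d s hlen
    rw [PySem.List.pyRange_neg_one_cons (by norm_num),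
        show ((0 : Nat) : Int) - 1 = -1 by norm_num,
        PySem.List.pyRange_neg_one_eq_nil (by norm_num)]
    simp only [List.foldl_cons, List.foldl_nil, pvHeapifyB]
    rw [hlen]
    exact inner_eq N (N + 1) 0 d s hlen
  | succ k ih =>
    intro d s hlen
    rw [PySem.List.pyRange_neg_one_cons (by omega), List.foldl_cons,
        show ((k+1 : Nat) : Int) - 1 = ((k : Nat) : Int) by push_cast; ring]
    have h1 := inner_eq N (N + 1) (k+1) d s hlen
    have hL : (pvSiftDownB d s (N + 1) (k+1)).1.length = N := by
      rw [pvSiftDownB_length]; exact hlen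
    simp only [pvHeapifyB]
    rw [hlen, h1]
    exact ih (pvSiftDownB d s (N + 1) (k+1)).1 (pvSiftDownB d s (N + 1) (k+1)).2 hL

-- ===== VERDICT (by name: the statement is the Claim_ definition above) =====
theorem build_heap_spec : Claim_equal_build_heap := by
  intro data _
  show build_heap data = build_heap_alt data
  simp only [build_heap, build_heap_alt]
  rw [show PySem.Int.floordiv ((data.length : Nat) : Int) 2 = ((data.length / 2 : Nat) : Int) from
        by exact_mod_cast PySem.Int.floordiv_natCast data.length 2]
  rw [outer_eq data.length (data.length / 2) data [] rfl]
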